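-- pv_equiv track=rewrite | github.com/RohanDebroy/gogoplayio_downloader | app.py | get_best_source
-- ===== SOURCE A (Python) =====
-- def get_best_source(sources: list) -> dict:
--     source_ord = ["1080 P", "720 P", "480 P", "360 P", "hls P", "Auto"]
--     # source_ord = ["720 P", "480 P", "360 P", "Auto"]
--     source_data = {}
--
--     for source in sources:
--         source_data[source['label']] = source
--
--     for ord in source_ord:
--         if ord in source_data.keys():
--             return source_data[ord]
--
--     return
-- ===== SOURCE B (Python) =====
-- def get_best_source(sources: list) -> dict:
--     source_ord = ["1080 P", "720 P", "480 P", "360 P", "hls P", "Auto"]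
--     rank = {label: i for i, label in enumerate(source_ord)}
--     best_rank = len(source_ord)
--     best = None
--     for source in sources:
--         r = rank.get(source['label'])
--         if r is not None and r <= best_rank:
--             best_rank = r
--             best = source
--     return best
-- ===== Notes on version B (the rewrite author's own statement) =====
-- stated objective: alternative
-- what changed: Instead of building a dict of all sources and then scanning the preference list, B precomputes a label->rank index and keeps a running best (rank, source) in one pass, with <= so a later duplicate of the best label wins like A's dict overwrite.
import Mathlib
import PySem

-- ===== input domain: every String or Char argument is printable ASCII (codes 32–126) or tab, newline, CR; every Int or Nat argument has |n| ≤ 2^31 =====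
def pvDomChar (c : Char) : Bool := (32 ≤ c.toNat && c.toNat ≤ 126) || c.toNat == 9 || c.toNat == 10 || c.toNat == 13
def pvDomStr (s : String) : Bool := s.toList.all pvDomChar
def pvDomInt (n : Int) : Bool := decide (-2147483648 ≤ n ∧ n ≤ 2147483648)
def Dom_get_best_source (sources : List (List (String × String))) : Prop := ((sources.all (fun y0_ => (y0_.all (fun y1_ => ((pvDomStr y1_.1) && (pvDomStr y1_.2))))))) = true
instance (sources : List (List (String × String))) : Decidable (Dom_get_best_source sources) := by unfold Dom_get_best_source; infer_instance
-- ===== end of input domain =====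

set_option maxRecDepth 10000


-- B replaces A's build-a-dict-of-all-sources-then-scan-the-preference-list with a single
-- pass keeping a running best (rank, source); equal return value wherever A returns.

-- ===== PORT A =====
-- for ord in source_ord: if ord in source_data: return source_data[ord]
def pvFindOrd (ords : List String) (d : PySem.Dict String (List (String × String))) : Option (List (String × String)) :=
  match ords with
  | [] => none
  | o :: rest =>
    match d.get? o with
    | some v => some v
    | none => pvFindOrd rest d

-- source_data[source['label']] = source  (source['label'] via getD ""; inside Pre_ the key is present, so exact there)
def pvStepA (d : PySem.Dict String (List (String × String))) (source : List (String × String)) :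
    PySem.Dict String (List (String × String)) :=
  d.insert (((PySem.Dict.mk source).get? "label").getD "") source

def get_best_source (sources : List (List (String × String))) : Option (List (String × String)) :=
  let source_ord := ["1080 P", "720 P", "480 P", "360 P", "hls P", "Auto"]
  let source_data := sources.foldl pvStepA PySem.Dict.empty
  pvFindOrd source_ord source_data

-- ===== PORT B =====
-- rank = {label: i for i, label in enumerate(source_ord)}
def pvRank : PySem.Dict String Int :=
  PySem.Dict.ofList [("1080 P", 0), ("720 P", 1), ("480 P", 2), ("360 P", 3), ("hls P", 4), ("Auto", 5)]

-- loop body: r = rank.get(source['label']); if r is not None and r <= best_rank: update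
def pvStepB (st : Int × Option (List (String × String))) (source : List (String × String)) :
    Int × Option (List (String × String)) :=
  match pvRank.get? (((PySem.Dict.mk source).get? "label").getD "") with
  | some r => if r ≤ st.1 then (r, some source) else st
  | none => st

def get_best_source_alt (sources : List (List (String × String))) : Option (List (String × String)) :=
  (sources.foldl pvStepB (6, none)).2

-- ===== PRECONDITION & SPEC =====
-- Pre_ excludes exactly the inputs on which Python A raises KeyError: some source has no "label" key.
def Pre_get_best_source (sources : List (List (String × String))) : Prop :=
  (sources.all (fun s => s.any (fun kv => kv.1 == "label"))) = true
instance (sources : List (List (String × String))) : Decidable (Pre_get_best_source sources) := by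
  unfold Pre_get_best_source; infer_instance

def pvWitness_get_best_source : (List (List (String × String))) :=
  [[("label", "480 P"), ("file", "u1")], [("label", "1080 P"), ("file", "u2")]]

def Spec_get_best_source (sources : List (List (String × String))) (out : Option (List (String × String))) : Prop := out = get_best_source_alt sources
instance (sources : List (List (String × String))) (out : Option (List (String × String))) : Decidable (Spec_get_best_source sources out) := by unfold Spec_get_best_source; infer_instance

-- ===== CLAIM (what is proved, stated in full; the proofs are below) =====
def Claim_equal_get_best_source : Prop := ∀ (sources : List (List (String × String))), Dom_get_best_source sources → Pre_get_best_source sources → Spec_get_best_source sources (get_best_source sources)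

-- ===== LEMMAS AND PROOFS =====

def pvRankIdx (d : PySem.Dict String (List (String × String))) : Int :=
  match d.get? "1080 P" with
  | some _ => 0
  | none => match d.get? "720 P" with
    | some _ => 1
    | none => match d.get? "480 P" with
      | some _ => 2
      | none => match d.get? "360 P" with
        | some _ => 3
        | none => match d.get? "hls P" with
          | some _ => 4
          | none => match d.get? "Auto" with
            | some _ => 5
            | none => 6

lemma step_core (d : PySem.Dict String (List (String × String))) (s : List (String × String)) :
    pvStepB (pvRankIdx d, pvFindOrd ["1080 P", "720 P", "480 P", "360 P", "hls P", "Auto"] d) s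
      = (pvRankIdx (pvStepA d s), pvFindOrd ["1080 P", "720 P", "480 P", "360 P", "hls P", "Auto"] (pvStepA d s)) := by
  simp only [pvStepB, pvStepA]
  generalize ((PySem.Dict.mk s).get? "label").getD "" = x
  by_cases h0 : x = "1080 P"
  · subst h0
    rw [show pvRank.get? "1080 P" = some 0 from by decide]
    cases c0 : d.get? "1080 P" <;> cases c1 : d.get? "720 P" <;> cases c2 : d.get? "480 P" <;> cases c3 : d.get? "360 P" <;> cases c4 : d.get? "hls P" <;> cases c5 : d.get? "Auto" <;>
      simp [pvRankIdx, pvFindOrd, c0, c1, c2, c3, c4, c5]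
  ·
    by_cases h1 : x = "720 P"
    · subst h1
      rw [show pvRank.get? "720 P" = some 1 from by decide]
      cases c0 : d.get? "1080 P" <;> cases c1 : d.get? "720 P" <;> cases c2 : d.get? "480 P" <;> cases c3 : d.get? "360 P" <;> cases c4 : d.get? "hls P" <;> cases c5 : d.get? "Auto" <;>
        simp [pvRankIdx, pvFindOrd, PySem.Dict.get?_insert, c0, c1, c2, c3, c4, c5]
    ·
      by_cases h2 : x = "480 P"
      · subst h2
        rw [show pvRank.get? "480 P" = some 2 from by decide]
        cases c0 : d.get? "1080 P" <;> cases c1 : d.get? "720 P" <;> cases c2 : d.get? "480 P" <;> cases c3 : d.get? "360 P" <;> cases c4 : d.get? "hls P" <;> cases c5 : d.get? "Auto" <;>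
          simp [pvRankIdx, pvFindOrd, PySem.Dict.get?_insert, c0, c1, c2, c3, c4, c5]
      ·
        by_cases h3 : x = "360 P"
        · subst h3
          rw [show pvRank.get? "360 P" = some 3 from by decide]
          cases c0 : d.get? "1080 P" <;> cases c1 : d.get? "720 P" <;> cases c2 : d.get? "480 P" <;> cases c3 : d.get? "360 P" <;> cases c4 : d.get? "hls P" <;> cases c5 : d.get? "Auto" <;>
            simp [pvRankIdx, pvFindOrd, PySem.Dict.get?_insert, c0, c1, c2, c3, c4, c5]
        ·
          by_cases h4 : x = "hls P"
          · subst h4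
            rw [show pvRank.get? "hls P" = some 4 from by decide]
            cases c0 : d.get? "1080 P" <;> cases c1 : d.get? "720 P" <;> cases c2 : d.get? "480 P" <;> cases c3 : d.get? "360 P" <;> cases c4 : d.get? "hls P" <;> cases c5 : d.get? "Auto" <;>
              simp [pvRankIdx, pvFindOrd, PySem.Dict.get?_insert, c0, c1, c2, c3, c4, c5]
          ·
            by_cases h5 : x = "Auto"
            · subst h5
              rw [show pvRank.get? "Auto" = some 5 from by decide]
              cases c0 : d.get? "1080 P" <;> cases c1 : d.get? "720 P" <;> cases c2 : d.get? "480 P" <;> cases c3 : d.get? "360 P" <;> cases c4 : d.get? "hls P" <;> cases c5 : d.get? "Auto" <;>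
                simp [pvRankIdx, pvFindOrd, PySem.Dict.get?_insert, c0, c1, c2, c3, c4, c5]
            ·
              have hr : pvRank.get? x = none := by
                rw [show pvRank = PySem.Dict.mk [("1080 P", (0:Int)), ("720 P", 1), ("480 P", 2), ("360 P", 3), ("hls P", 4), ("Auto", 5)] from by decide]
                rw [PySem.Dict.get?_mk_cons, PySem.Dict.get?_mk_cons, PySem.Dict.get?_mk_cons, PySem.Dict.get?_mk_cons, PySem.Dict.get?_mk_cons, PySem.Dict.get?_mk_cons]
                simp only [beq_iff_eq]
                rw [if_neg (Ne.symm h0) , if_neg (Ne.symm h1) , if_neg (Ne.symm h2) , if_neg (Ne.symm h3) , if_neg (Ne.symm h4) , if_neg (Ne.symm h5)]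
                rfl
              rw [hr]
              have e0 : (d.insert x s).get? "1080 P" = d.get? "1080 P" := PySem.Dict.get?_insert_of_ne _ _ (Ne.symm h0)
              have e1 : (d.insert x s).get? "720 P" = d.get? "720 P" := PySem.Dict.get?_insert_of_ne _ _ (Ne.symm h1)
              have e2 : (d.insert x s).get? "480 P" = d.get? "480 P" := PySem.Dict.get?_insert_of_ne _ _ (Ne.symm h2)
              have e3 : (d.insert x s).get? "360 P" = d.get? "360 P" := PySem.Dict.get?_insert_of_ne _ _ (Ne.symm h3)
              have e4 : (d.insert x s).get? "hls P" = d.get? "hls P" := PySem.Dict.get?_insert_of_ne _ _ (Ne.symm h4)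
              have e5 : (d.insert x s).get? "Auto" = d.get? "Auto" := PySem.Dict.get?_insert_of_ne _ _ (Ne.symm h5)
              simp only [pvRankIdx, pvFindOrd, e0, e1, e2, e3, e4, e5]

lemma fold_invariant (l : List (List (String × String))) (d : PySem.Dict String (List (String × String))) :
    l.foldl pvStepB (pvRankIdx d, pvFindOrd ["1080 P", "720 P", "480 P", "360 P", "hls P", "Auto"] d)
      = (pvRankIdx (l.foldl pvStepA d), pvFindOrd ["1080 P", "720 P", "480 P", "360 P", "hls P", "Auto"] (l.foldl pvStepA d)) := by
  induction l generalizing d with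
  | nil => rfl
  | cons s rest ih =>
      simp only [List.foldl_cons, step_core d s]
      exact ih (pvStepA d s)

-- ===== VERDICT (by name: the statement is the Claim_ definition above) =====
theorem get_best_source_spec : Claim_equal_get_best_source := by
  intro sources _ _
  unfold Spec_get_best_source get_best_source get_best_source_alt
  have h := fold_invariant sources PySem.Dict.empty
  have h0 : pvRankIdx PySem.Dict.empty = 6 := by rfl
  have h1 : pvFindOrd ["1080 P", "720 P", "480 P", "360 P", "hls P", "Auto"] PySem.Dict.empty = none := by rfl
  rw [h0, h1] at h
  simp [h]
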